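-- pv_equiv track=rewrite | github.com/Lukabartovich/pygame_functions | pygame_functions.py | not_not_in_list
-- ===== SOURCE A (Python) =====
-- def not_not_in_list(list1, thing):
--     state = False
--     for i in list1:
--         if i == thing:
--             pass
--         else:
--             state = True
--
--     return state
-- ===== SOURCE B (Python) =====
-- def not_not_in_list(list1, thing):
--     if not list1:
--         return False
--     return min(list1) != thing or max(list1) != thing
-- ===== Notes on version B (the rewrite author's own statement) =====
-- stated objective: alternative
-- what changed: Replaces A's scan-for-mismatch flag loop with an order-based check: the list has a non-matching element iff it is non-empty and its minimum or maximum differs from thing.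
import Mathlib
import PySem

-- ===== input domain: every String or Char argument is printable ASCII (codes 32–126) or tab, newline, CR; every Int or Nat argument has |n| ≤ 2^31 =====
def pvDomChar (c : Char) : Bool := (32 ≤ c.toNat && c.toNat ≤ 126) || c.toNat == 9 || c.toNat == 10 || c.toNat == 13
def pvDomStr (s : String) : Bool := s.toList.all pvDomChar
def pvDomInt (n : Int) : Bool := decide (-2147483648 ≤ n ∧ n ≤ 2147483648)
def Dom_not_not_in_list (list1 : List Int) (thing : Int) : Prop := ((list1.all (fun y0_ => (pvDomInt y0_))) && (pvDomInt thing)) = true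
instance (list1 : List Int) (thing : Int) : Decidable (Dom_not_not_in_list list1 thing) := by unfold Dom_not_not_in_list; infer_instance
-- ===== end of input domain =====

-- B replaces A's scan-for-mismatch flag loop with an order-based check: a non-matching
-- element exists iff the list is non-empty and its minimum or maximum differs from thing.

-- ===== PORT A =====
-- Port of A: fold over the list carrying the 'state' flag, branches in A's order.
def not_not_in_list (list1 : List Int) (thing : Int) : Bool :=
  list1.foldl (fun state i => if i == thing then state else true) false

-- ===== PORT B =====
-- Port of B: empty guard, then compare min(list1) and max(list1) against thing.
def not_not_in_list_alt (list1 : List Int) (thing : Int) : Bool :=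
  if list1 = [] then false
  else
    match PySem.List.min? list1 (fun x => x), PySem.List.max? list1 (fun x => x) with
    | some mn, some mx => mn != thing || mx != thing
    | _, _ => false

-- ===== PRECONDITION & SPEC =====
def Spec_not_not_in_list (list1 : List Int) (thing : Int) (out : Bool) : Prop := out = not_not_in_list_alt list1 thing
instance (list1 : List Int) (thing : Int) (out : Bool) : Decidable (Spec_not_not_in_list list1 thing out) := by unfold Spec_not_not_in_list; infer_instance

-- ===== CLAIM (what is proved, stated in full; the proofs are below) =====
def Claim_equal_not_not_in_list : Prop := ∀ (list1 : List Int) (thing : Int), Dom_not_not_in_list list1 thing → Spec_not_not_in_list list1 thing (not_not_in_list list1 thing)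

-- ===== LEMMAS AND PROOFS =====

-- ===== VERDICT (by name: the statement is the Claim_ definition above) =====
theorem flag_eq_any (l : List Int) (t : Int) (b : Bool) :
    l.foldl (fun state i => if i == t then state else true) b
      = (b || l.any (fun i => i != t)) := by
  induction l generalizing b with
  | nil => simp
  | cons x xs ih =>
    simp only [List.foldl_cons, ih, List.any_cons]
    by_cases h : x = t <;> simp [h]

theorem not_not_in_list_spec : Claim_equal_not_not_in_list := by
  intro l t _
  unfold Spec_not_not_in_list not_not_in_list not_not_in_list_alt
  rw [flag_eq_any]
  cases l with
  | nil => simp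
  | cons x xs =>
    rw [if_neg (by simp)]
    rcases hmn : PySem.List.min? (x :: xs) (fun x => x) with _ | mn
    · exact absurd ((PySem.List.min?_eq_none_iff _ _).mp hmn) (by simp)
    rcases hmx : PySem.List.max? (x :: xs) (fun x => x) with _ | mx
    · exact absurd ((PySem.List.max?_eq_none_iff _ _).mp hmx) (by simp)
    have hmnmem := PySem.List.min?_mem hmn
    have hmxmem := PySem.List.max?_mem hmx
    have hmnmin := PySem.List.min?_isMin hmn
    have hmxmax := PySem.List.max?_isMax hmx
    simp only [Bool.false_or]
    by_cases hall : ∀ y ∈ (x :: xs), y = t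
    · have h1 : ((x :: xs).any (fun i => i != t)) = false := by
        simp only [List.any_eq_false, bne_iff_ne, ne_eq, not_not]
        exact hall
      rw [h1, hall mn hmnmem, hall mx hmxmem]
      simp
    · rw [not_forall] at hall
      simp only [not_forall, exists_prop] at hall
      obtain ⟨y, hy, hyne⟩ := hall
      have hany : ((x :: xs).any (fun i => i != t)) = true := by
        simp only [List.any_eq_true, bne_iff_ne]; exact ⟨y, hy, hyne⟩
      rw [hany]
      have h1 := hmnmin y hy
      have h2 := hmxmax y hy
      have : mn ≠ t ∨ mx ≠ t := by
        by_cases hc : y < t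
        · left; omega
        · right; omega
      rcases this with h | h <;> simp [h]
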